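-- pv_equiv track=rewrite | github.com/lukasberglund/reversal_curse | scripts/reverse_experiments/in_context_eval.py | generate_reversal_example
-- ===== SOURCE A (Python) =====
-- p2d_template = """<name> is <description>.
-- Question: Who is <description>?
-- Answer: The person you are asking for is"""
--
-- d2p_template = """<description> is <name>.
-- Question: What is <name> known for?
-- Answer: <name> is known for being"""
--
-- def generate_reversal_example(name, description, few_shot_examples: list[tuple[str, str]] = [], p2d=True) -> dict[str, str]:
--     few_shot_example_dicts = [generate_reversal_example(name, description, p2d=p2d) for name, description in few_shot_examples]
--     few_shot_prompt = '\n\n'.join([example['prompt'] + example['completion'] for example in few_shot_example_dicts])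
--     if p2d:
--         prompt_template = p2d_template
--         question_template = "Who is <description>?"
--     else:
--         prompt_template = d2p_template
--         question_template = "What is <name> known for?"
--     prompt = prompt_template.replace('<description>', description).replace('<name>', name)
--     # capitalize
--     prompt = prompt[0].upper() + prompt[1:]
--     if few_shot_prompt > '':
--         prompt = few_shot_prompt + '\n\n' + prompt
--     completion = f' {name}.' if p2d else f' {description}.'
--
--     return {'prompt': prompt, 'completion': completion, 'question': question_template.replace('<description>', description).replace('<name>', name)}
-- ===== SOURCE B (Python) =====
-- p2d_template = """<name> is <description>.
-- Question: Who is <description>?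
-- Answer: The person you are asking for is"""
--
-- d2p_template = """<description> is <name>.
-- Question: What is <name> known for?
-- Answer: <name> is known for being"""
--
--
-- def _fill(template, name, description):
--     return template.replace('<description>', description).replace('<name>', name)
--
--
-- def _cap(s):
--     return s[0].upper() + s[1:]
--
--
-- def generate_reversal_example(name, description, few_shot_examples: list[tuple[str, str]] = [], p2d=True) -> dict[str, str]:
--     prompt_template = p2d_template if p2d else d2p_template
--     question_template = "Who is <description>?" if p2d else "What is <name> known for?"
--     # one flat list of blocks: each few-shot block is prompt+completion, then the main prompt; a single join builds the whole prompt
--     parts = []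
--     for n, d in few_shot_examples:
--         completion = f' {n}.' if p2d else f' {d}.'
--         parts.append(_cap(_fill(prompt_template, n, d)) + completion)
--     parts.append(_cap(_fill(prompt_template, name, description)))
--     return {'prompt': '\n\n'.join(parts),
--             'completion': f' {name}.' if p2d else f' {description}.',
--             'question': _fill(question_template, name, description)}
-- ===== Notes on version B (the rewrite author's own statement) =====
-- stated objective: simpler
-- what changed: A recursively calls itself on each few-shot pair to build full dicts, joins prompt+completion of those dicts, and conditionally prepends the few-shot prompt guarded by a string comparison; B has no recursion: it builds one flat list of blocks (each few-shot prompt+completion, then the main prompt) with a shared fill/capitalize helper and forms the whole prompt with a single '\n\n'.join, no guard needed.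
import Mathlib
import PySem

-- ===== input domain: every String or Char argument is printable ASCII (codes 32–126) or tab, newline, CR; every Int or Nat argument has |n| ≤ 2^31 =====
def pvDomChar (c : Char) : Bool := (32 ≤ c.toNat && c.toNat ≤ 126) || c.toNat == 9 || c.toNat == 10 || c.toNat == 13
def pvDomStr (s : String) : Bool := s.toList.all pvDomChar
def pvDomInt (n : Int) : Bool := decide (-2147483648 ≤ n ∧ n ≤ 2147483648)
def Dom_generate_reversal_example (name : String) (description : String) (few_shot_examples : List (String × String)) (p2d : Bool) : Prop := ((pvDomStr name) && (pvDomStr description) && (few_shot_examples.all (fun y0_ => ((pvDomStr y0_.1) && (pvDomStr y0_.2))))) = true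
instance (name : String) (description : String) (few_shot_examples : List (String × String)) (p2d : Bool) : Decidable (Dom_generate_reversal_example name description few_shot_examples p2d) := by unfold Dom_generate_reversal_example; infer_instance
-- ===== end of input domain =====

-- B replaces A's self-recursion + conditional few-shot prepend by one flat list of blocks
-- (few-shot blocks then the main prompt) joined once with '\n\n' (objective: simpler).

-- ===== PORT A =====

def pvP2dTemplate : String := "<name> is <description>.\nQuestion: Who is <description>?\nAnswer: The person you are asking for is"

def pvD2pTemplate : String := "<description> is <name>.\nQuestion: What is <name> known for?\nAnswer: <name> is known for being"

-- example['prompt'] on the three-key dicts A itself built: the key is always present, so the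
-- default "" of the first-match lookup is never used.
def pvDictGet (d : List (String × String)) (k : String) : String :=
  ((d.find? (fun kv => kv.1 == k)).map (·.2)).getD ""

-- s[0].upper() + s[1:] ; s here is a filled template, never empty, so the IndexError branch
-- (pyGet? = none) is unreachable and the "" there is never used.
def pvCapitalize (s : String) : String :=
  (match PySem.Str.pyGet? s 0 with
   | some c => String.ofList [PySem.Chars.upperChar c]
   | none => "") ++ PySem.Str.slice s (some 1) none

def generate_reversal_example (name : String) (description : String) (few_shot_examples : List (String × String)) (p2d : Bool) : List (String × String) :=
  let few_shot_example_dicts :=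
    few_shot_examples.attach.map (fun x => generate_reversal_example x.1.1 x.1.2 [] p2d)
  let few_shot_prompt :=
    PySem.Str.join "\n\n" (few_shot_example_dicts.map (fun ex => pvDictGet ex "prompt" ++ pvDictGet ex "completion"))
  let prompt_template := if p2d then pvP2dTemplate else pvD2pTemplate
  let question_template := if p2d then "Who is <description>?" else "What is <name> known for?"
  let prompt := PySem.Str.replace (PySem.Str.replace prompt_template "<description>" description) "<name>" name
  let prompt := pvCapitalize prompt
  -- few_shot_prompt > '' : Python str comparison = code-point lexicographic '<' on toList
  let prompt := if ("" : String).toList < few_shot_prompt.toList then few_shot_prompt ++ "\n\n" ++ prompt else prompt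
  let completion := if p2d then " " ++ name ++ "." else " " ++ description ++ "."
  [("prompt", prompt), ("completion", completion),
   ("question", PySem.Str.replace (PySem.Str.replace question_template "<description>" description) "<name>" name)]
termination_by few_shot_examples.length
decreasing_by
  simpa using List.length_pos_of_mem x.2

-- ===== PORT B =====

def pvFill (template n d : String) : String :=
  PySem.Str.replace (PySem.Str.replace template "<description>" d) "<name>" n

def generate_reversal_example_alt (name : String) (description : String) (few_shot_examples : List (String × String)) (p2d : Bool) : List (String × String) :=
  let prompt_template := if p2d then pvP2dTemplate else pvD2pTemplate
  let question_template := if p2d then "Who is <description>?" else "What is <name> known for?"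
  let parts := few_shot_examples.map (fun nd =>
    pvCapitalize (pvFill prompt_template nd.1 nd.2) ++ (if p2d then " " ++ nd.1 ++ "." else " " ++ nd.2 ++ "."))
  let parts := parts ++ [pvCapitalize (pvFill prompt_template name description)]
  [("prompt", PySem.Str.join "\n\n" parts),
   ("completion", if p2d then " " ++ name ++ "." else " " ++ description ++ "."),
   ("question", pvFill question_template name description)]

-- ===== PRECONDITION & SPEC =====
def Spec_generate_reversal_example (name : String) (description : String) (few_shot_examples : List (String × String)) (p2d : Bool) (out : List (String × String)) : Prop := out = generate_reversal_example_alt name description few_shot_examples p2d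
instance (name : String) (description : String) (few_shot_examples : List (String × String)) (p2d : Bool) (out : List (String × String)) : Decidable (Spec_generate_reversal_example name description few_shot_examples p2d out) := by unfold Spec_generate_reversal_example; infer_instance

-- ===== CLAIM (what is proved, stated in full; the proofs are below) =====
def Claim_equal_generate_reversal_example : Prop := ∀ (name : String) (description : String) (few_shot_examples : List (String × String)) (p2d : Bool), Dom_generate_reversal_example name description few_shot_examples p2d → Spec_generate_reversal_example name description few_shot_examples p2d (generate_reversal_example name description few_shot_examples p2d)

-- ===== LEMMAS AND PROOFS =====

-- A with no few-shot examples produces exactly one of B's blocks plus completion/question.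
theorem pv_base (n d : String) (p2d : Bool) :
    generate_reversal_example n d [] p2d =
      [("prompt", pvCapitalize (pvFill (if p2d then pvP2dTemplate else pvD2pTemplate) n d)),
       ("completion", if p2d then " " ++ n ++ "." else " " ++ d ++ "."),
       ("question", pvFill (if p2d then "Who is <description>?" else "What is <name> known for?") n d)] := by
  rw [generate_reversal_example]
  simp [pvFill, PySem.Str.join]

theorem pv_join_snoc (sep : List Char) (xs : List (List Char)) (y : List Char) :
    PySem.Chars.join sep (xs ++ [y]) =
      if xs = [] then y else PySem.Chars.join sep xs ++ sep ++ y := by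
  induction xs with
  | nil => simp [PySem.Chars.join_singleton]
  | cons a as ih =>
    cases as with
    | nil => simp [PySem.Chars.join_singleton, PySem.Chars.join_cons_cons]
    | cons b bs =>
      rw [List.cons_append, List.cons_append, PySem.Chars.join_cons_cons, ← List.cons_append, ih,
        if_neg (List.cons_ne_nil b bs), if_neg (List.cons_ne_nil a (b :: bs)),
        PySem.Chars.join_cons_cons]
      simp [List.append_assoc]

theorem pv_join_cons_ne_nil (sep b : List Char) (bs : List (List Char)) (hb : b ≠ []) :
    PySem.Chars.join sep (b :: bs) ≠ [] := by
  cases bs <;> simp [PySem.Chars.join_singleton, PySem.Chars.join_cons_cons, hb]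

-- A's guarded prepend equals B's single join over blocks ++ [main], when every block is nonempty.
theorem pv_prompt_eq (blocks : List String) (main : String)
    (hb : ∀ b ∈ blocks, b.toList ≠ []) :
    (if ("" : String).toList < (PySem.Str.join "\n\n" blocks).toList
     then PySem.Str.join "\n\n" blocks ++ "\n\n" ++ main else main)
    = PySem.Str.join "\n\n" (blocks ++ [main]) := by
  cases blocks with
  | nil =>
    rw [if_neg (by simp [PySem.Str.toList_join, PySem.Chars.join_nil])]
    apply String.toList_inj.mp
    simp [PySem.Str.toList_join, PySem.Chars.join_singleton]
  | cons b bs =>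
    have hbne : b.toList ≠ [] := hb b (by simp)
    have hjoin : (PySem.Str.join "\n\n" (b :: bs)).toList ≠ [] := by
      rw [PySem.Str.toList_join, List.map_cons]
      exact pv_join_cons_ne_nil _ _ _ hbne
    rw [if_pos (by
      obtain ⟨c, cs, hc⟩ := List.exists_cons_of_ne_nil hjoin
      rw [hc]; simp [List.nil_lt_cons])]
    apply String.toList_inj.mp
    simp only [String.toList_append, PySem.Str.toList_join, List.map_append, List.map_cons,
      List.map_nil, pv_join_snoc, List.cons_ne_nil, if_false, List.append_assoc]

-- ===== VERDICT (by name: the statement is the Claim_ definition above) =====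
theorem generate_reversal_example_spec : Claim_equal_generate_reversal_example := by
  intro name description fse p2d _
  unfold Spec_generate_reversal_example
  rw [generate_reversal_example, generate_reversal_example_alt]
  rw [show (fun (x : {x // x ∈ fse}) => generate_reversal_example x.1.1 x.1.2 [] p2d)
        = (fun (y : String × String) => generate_reversal_example y.1 y.2 [] p2d) ∘ Subtype.val from rfl,
      ← List.map_map, List.attach_map_subtype_val]
  simp only [pv_base, List.map_map, pvFill, Function.comp_def]
  rw [List.cons.injEq, Prod.mk.injEq]
  refine ⟨⟨rfl, ?_⟩, rfl⟩
  have hmap : (fse.map (fun y : String × String =>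
        pvDictGet
          [("prompt", pvCapitalize (PySem.Str.replace (PySem.Str.replace (if p2d = true then pvP2dTemplate else pvD2pTemplate) "<description>" y.2) "<name>" y.1)),
           ("completion", if p2d = true then " " ++ y.1 ++ "." else " " ++ y.2 ++ "."),
           ("question", PySem.Str.replace (PySem.Str.replace (if p2d = true then "Who is <description>?" else "What is <name> known for?") "<description>" y.2) "<name>" y.1)] "prompt" ++
        pvDictGet
          [("prompt", pvCapitalize (PySem.Str.replace (PySem.Str.replace (if p2d = true then pvP2dTemplate else pvD2pTemplate) "<description>" y.2) "<name>" y.1)),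
           ("completion", if p2d = true then " " ++ y.1 ++ "." else " " ++ y.2 ++ "."),
           ("question", PySem.Str.replace (PySem.Str.replace (if p2d = true then "Who is <description>?" else "What is <name> known for?") "<description>" y.2) "<name>" y.1)] "completion"))
      = fse.map (fun nd : String × String =>
          pvCapitalize (PySem.Str.replace (PySem.Str.replace (if p2d = true then pvP2dTemplate else pvD2pTemplate) "<description>" nd.2) "<name>" nd.1) ++
            (if p2d = true then " " ++ nd.1 ++ "." else " " ++ nd.2 ++ ".")) := by
    apply List.map_congr_left
    intro nd _
    simp [pvDictGet]
  rw [hmap, pv_prompt_eq]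
  intro b hbmem
  simp only [List.mem_map] at hbmem
  obtain ⟨nd, _, rfl⟩ := hbmem
  cases p2d <;> simp
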